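-- pv_equiv track=rewrite | github.com/yummydum/ccg2lambda | scripts/theorem.py | insert_axioms_in_coq_script
-- ===== SOURCE A (Python) =====
-- def get_theorem_line(coq_script_lines):
--     for i, line in enumerate(coq_script_lines):
--         if line.startswith('Theorem '):
--             return i
--     assert False, 'There was no theorem defined in the coq script: {0}'\
--         .format('\n'.join(coq_script_lines))
--
-- def insert_axioms_in_coq_script(axioms, coq_script):
--     coq_script_lines = coq_script.split('\n')
--     theorem_line = get_theorem_line(coq_script_lines)
--     for axiom in axioms:
--         axiom_name = axiom.split()[1]
--         coq_script_lines.insert(theorem_line,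
--                                 'Hint Resolve {0}.'.format(axiom_name))
--         coq_script_lines.insert(theorem_line, axiom)
--     new_coq_script = '\n'.join(coq_script_lines)
--     return new_coq_script
-- ===== SOURCE B (Python) =====
-- def insert_axioms_in_coq_script(axioms, coq_script):
--     out = []
--     found = False
--     for line in coq_script.split('\n'):
--         if not found and line.startswith('Theorem '):
--             found = True
--             for axiom in reversed(axioms):
--                 out.append(axiom)
--                 out.append('Hint Resolve {0}.'.format(axiom.split()[1]))
--         out.append(line)
--     assert found, 'There was no theorem defined in the coq script: {0}'.format(coq_script)
--     return '\n'.join(out)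
-- ===== Notes on version B (the rewrite author's own statement) =====
-- stated objective: alternative
-- what changed: Replaces A's two-phase scan-for-theorem-index plus repeated in-place list.insert (each shifting the tail) with a single pass that rebuilds the line list, splicing the reversed axiom/hint block in front of the first 'Theorem ' line.
import Mathlib
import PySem

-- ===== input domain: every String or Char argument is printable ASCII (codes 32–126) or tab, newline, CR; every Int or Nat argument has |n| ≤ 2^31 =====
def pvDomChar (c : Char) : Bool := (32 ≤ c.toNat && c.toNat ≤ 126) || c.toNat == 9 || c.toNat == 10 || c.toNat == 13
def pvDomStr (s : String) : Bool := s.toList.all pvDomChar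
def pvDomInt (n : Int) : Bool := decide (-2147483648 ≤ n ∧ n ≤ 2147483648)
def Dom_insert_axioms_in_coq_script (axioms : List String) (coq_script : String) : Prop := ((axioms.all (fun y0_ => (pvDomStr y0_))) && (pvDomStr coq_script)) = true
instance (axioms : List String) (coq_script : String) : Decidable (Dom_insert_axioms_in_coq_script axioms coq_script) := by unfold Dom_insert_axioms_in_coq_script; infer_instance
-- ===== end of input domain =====

-- B replaces A's scan-for-index + repeated list.insert with a single rebuilding pass
-- that splices the reversed axiom/hint block before the first 'Theorem ' line (alternative decomposition).

-- ===== PORT A =====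
-- for i, line in enumerate(lines): if line.startswith('Theorem '): return i   (none = the assert fires)
def pvGetTheoremLine : List String → Option Nat
  | [] => none
  | l :: ls =>
    if PySem.Str.startswith l "Theorem " then some 0
    else (pvGetTheoremLine ls).map (· + 1)

-- lines = coq_script.split('\n')  ('\n' ≠ "", so split? is always some and getD never defaults)
-- axiom_name = axiom.split()[1] is pyGetD … 1 ""; Python raises IndexError there if absent (excluded by Pre_)
def insert_axioms_in_coq_script (axioms : List String) (coq_script : String) : String :=
  match pvGetTheoremLine ((PySem.Str.split? coq_script "\n").getD []) with
  | none => ""  -- Python: assert False (AssertionError); excluded by Pre_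
  | some t =>
    PySem.Str.join "\n" (axioms.foldl (fun ls ax =>
      PySem.List.insert
        (PySem.List.insert ls (t : Int)
          ("Hint Resolve " ++ PySem.List.pyGetD (PySem.Str.split₀ ax) 1 "" ++ "."))
        (t : Int) ax) ((PySem.Str.split? coq_script "\n").getD []))

-- ===== PORT B =====
-- the block appended at the first theorem line: for axiom in reversed(axioms): out.append(axiom); out.append(hint)
def pvAxiomBlock (axioms : List String) : List String :=
  axioms.reverse.flatMap (fun ax =>
    [ax, "Hint Resolve " ++ PySem.List.pyGetD (PySem.Str.split₀ ax) 1 "" ++ "."])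

-- the single pass with the 'found' flag
def pvScan (blk : List String) : List String → Bool → List String
  | [], _ => []
  | l :: ls, found =>
    if !found && PySem.Str.startswith l "Theorem " then
      blk ++ l :: pvScan blk ls true
    else
      l :: pvScan blk ls found

def insert_axioms_in_coq_script_alt (axioms : List String) (coq_script : String) : String :=
  PySem.Str.join "\n" (pvScan (pvAxiomBlock axioms) ((PySem.Str.split? coq_script "\n").getD []) false)

-- ===== PRECONDITION & SPEC =====
-- Pre_ excludes exactly the inputs on which A raises: no line starting with 'Theorem ' (AssertionError)
-- or an axiom with fewer than two whitespace-separated tokens (IndexError); B raises there too.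
def Pre_insert_axioms_in_coq_script (axioms : List String) (coq_script : String) : Prop :=
  (((PySem.Str.split? coq_script "\n").getD []).any (fun l => PySem.Str.startswith l "Theorem ")) = true ∧
  ∀ ax ∈ axioms, 2 ≤ (PySem.Str.split₀ ax).length

instance (axioms : List String) (coq_script : String) : Decidable (Pre_insert_axioms_in_coq_script axioms coq_script) := by unfold Pre_insert_axioms_in_coq_script; infer_instance

def pvWitness_insert_axioms_in_coq_script : List String × String :=
  (["Axiom ax1 : True."], "Require Import Coq.\nTheorem t : True.\nProof.")

def Spec_insert_axioms_in_coq_script (axioms : List String) (coq_script : String) (out : String) : Prop := out = insert_axioms_in_coq_script_alt axioms coq_script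
instance (axioms : List String) (coq_script : String) (out : String) : Decidable (Spec_insert_axioms_in_coq_script axioms coq_script out) := by unfold Spec_insert_axioms_in_coq_script; infer_instance

-- ===== CLAIM (what is proved, stated in full; the proofs are below) =====
def Claim_equal_insert_axioms_in_coq_script : Prop := ∀ (axioms : List String) (coq_script : String), Dom_insert_axioms_in_coq_script axioms coq_script → Pre_insert_axioms_in_coq_script axioms coq_script → Spec_insert_axioms_in_coq_script axioms coq_script (insert_axioms_in_coq_script axioms coq_script)

-- ===== LEMMAS AND PROOFS =====

-- pvGetTheoremLine finds the first theorem line: decomposition lemma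
theorem pvGetTheoremLine_spec (ls : List String) (t : Nat)
    (h : pvGetTheoremLine ls = some t) :
    ∃ pre thm suf, ls = pre ++ thm :: suf ∧ pre.length = t ∧
      (∀ l ∈ pre, PySem.Str.startswith l "Theorem " = false) ∧
      PySem.Str.startswith thm "Theorem " = true := by
  induction ls generalizing t with
  | nil => exact absurd h (by simp [pvGetTheoremLine])
  | cons l ls ih =>
    simp only [pvGetTheoremLine] at h
    by_cases hl : PySem.Str.startswith l "Theorem " = true
    · rw [if_pos hl] at h
      cases Option.some.inj h
      exact ⟨[], l, ls, rfl, rfl, by simp, hl⟩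
    · rw [if_neg hl] at h
      rw [Option.map_eq_some_iff] at h
      obtain ⟨t', ht', rfl⟩ := h
      obtain ⟨pre, thm, suf, rfl, rfl, hpre, hthm⟩ := ih t' ht'
      refine ⟨l :: pre, thm, suf, rfl, rfl, ?_, hthm⟩
      intro x hx
      rcases List.mem_cons.mp hx with rfl | hx
      · exact Bool.eq_false_iff.mpr hl
      · exact hpre x hx

theorem pvGetTheoremLine_isSome (ls : List String)
    (h : ls.any (fun l => PySem.Str.startswith l "Theorem ") = true) :
    ∃ t, pvGetTheoremLine ls = some t := by
  induction ls with
  | nil => simp at h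
  | cons l ls ih =>
    rw [List.any_cons, Bool.or_eq_true] at h
    by_cases hl : PySem.Str.startswith l "Theorem " = true
    · exact ⟨0, by simp only [pvGetTheoremLine, if_pos hl]⟩
    · obtain ⟨t, ht⟩ := ih (h.resolve_left hl)
      refine ⟨t + 1, ?_⟩
      simp only [pvGetTheoremLine, if_neg hl, ht, Option.map_some]

-- A's insert loop, characterized: repeated insertion at index pre.length builds the reversed block
theorem foldl_insert_block (axioms : List String) (pre mid : List String) :
    axioms.foldl (fun ls ax =>
      PySem.List.insert
        (PySem.List.insert ls ((pre.length : Nat) : Int)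
          ("Hint Resolve " ++ PySem.List.pyGetD (PySem.Str.split₀ ax) 1 "" ++ "."))
        ((pre.length : Nat) : Int) ax) (pre ++ mid)
    = pre ++ (axioms.reverse.flatMap (fun ax =>
        [ax, "Hint Resolve " ++ PySem.List.pyGetD (PySem.Str.split₀ ax) 1 "" ++ "."])) ++ mid := by
  induction axioms generalizing mid with
  | nil => simp
  | cons a axs ih =>
    have h1 : PySem.List.insert (pre ++ mid) ((pre.length : Nat) : Int)
        ("Hint Resolve " ++ PySem.List.pyGetD (PySem.Str.split₀ a) 1 "" ++ ".")
        = pre ++ ("Hint Resolve " ++ PySem.List.pyGetD (PySem.Str.split₀ a) 1 "" ++ ".") :: mid := by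
      rw [PySem.List.insert_natCast _ _ _ (by simp)]
      simp
    have h2 : PySem.List.insert
        (pre ++ ("Hint Resolve " ++ PySem.List.pyGetD (PySem.Str.split₀ a) 1 "" ++ ".") :: mid)
        ((pre.length : Nat) : Int) a
        = pre ++ a :: ("Hint Resolve " ++ PySem.List.pyGetD (PySem.Str.split₀ a) 1 "" ++ ".") :: mid := by
      rw [PySem.List.insert_natCast _ _ _ (by simp)]
      simp
    simp only [List.foldl_cons, h1, h2]
    rw [ih (a :: ("Hint Resolve " ++ PySem.List.pyGetD (PySem.Str.split₀ a) 1 "" ++ ".") :: mid)]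
    simp

-- B's scan: once found, the rest is copied unchanged
theorem pvScan_found (blk ls : List String) : pvScan blk ls true = ls := by
  induction ls with
  | nil => rfl
  | cons l ls ih => simp [pvScan, ih]

-- B's scan splices the block before the first theorem line
theorem pvScan_split (blk pre : List String) (thm : String) (suf : List String)
    (hpre : ∀ l ∈ pre, PySem.Str.startswith l "Theorem " = false)
    (hthm : PySem.Str.startswith thm "Theorem " = true) :
    pvScan blk (pre ++ thm :: suf) false = pre ++ blk ++ thm :: suf := by
  induction pre with
  | nil =>
    simp only [List.nil_append, pvScan]
    rw [if_pos (by rw [Bool.not_false, Bool.true_and]; exact hthm), pvScan_found]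
  | cons l pre ih =>
    have hl : PySem.Str.startswith l "Theorem " = false := hpre l (by simp)
    simp only [List.cons_append, pvScan]
    rw [if_neg (by rw [Bool.not_false, Bool.true_and, hl]; exact Bool.false_ne_true)]
    rw [ih (fun x hx => hpre x (by simp [hx]))]

-- ===== VERDICT (by name: the statement is the Claim_ definition above) =====
theorem insert_axioms_in_coq_script_spec : Claim_equal_insert_axioms_in_coq_script := by
  intro axioms coq_script _ hpre
  obtain ⟨hany, _⟩ := hpre
  obtain ⟨t, ht⟩ := pvGetTheoremLine_isSome _ hany
  obtain ⟨pre, thm, suf, hls, hlen, hp, hth⟩ := pvGetTheoremLine_spec _ _ ht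
  subst hlen
  unfold Spec_insert_axioms_in_coq_script insert_axioms_in_coq_script insert_axioms_in_coq_script_alt
  rw [ht, hls]
  simp only [foldl_insert_block axioms pre (thm :: suf), pvScan_split _ _ _ _ hp hth]
  rfl
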